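-- pv_equiv track=rewrite | github.com/AndreyV105105105/DISCRA_LABA1 | poly_logic.py | sub_p
-- ===== SOURCE A (Python) =====
-- def sub_p(p1, p2):
--     """Вычитание списков (нужно для Карацубы)"""
--     n = max(len(p1), len(p2))
--     res = [0] * n
--     for i in range(n):
--         v1 = p1[i] if i < len(p1) else 0
--         v2 = p2[i] if i < len(p2) else 0
--         res[i] = v1 - v2
--     return res
-- ===== SOURCE B (Python) =====
-- def sub_p(p1, p2):
--     """Вычитание списков (нужно для Карацубы)"""
--     m = min(len(p1), len(p2))
--     head = [x - y for x, y in zip(p1, p2)]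
--     if len(p1) > len(p2):
--         return head + p1[m:]
--     elif len(p2) > len(p1):
--         return head + [-x for x in p2[m:]]
--     else:
--         return head
-- ===== Notes on version B (the rewrite author's own statement) =====
-- stated objective: idiomatic
-- what changed: Replaces the single padded index loop (range over max length with per-index bounds checks) by a zip over the overlap plus one branch-selected tail pass (copied or negated slice).
import Mathlib
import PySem

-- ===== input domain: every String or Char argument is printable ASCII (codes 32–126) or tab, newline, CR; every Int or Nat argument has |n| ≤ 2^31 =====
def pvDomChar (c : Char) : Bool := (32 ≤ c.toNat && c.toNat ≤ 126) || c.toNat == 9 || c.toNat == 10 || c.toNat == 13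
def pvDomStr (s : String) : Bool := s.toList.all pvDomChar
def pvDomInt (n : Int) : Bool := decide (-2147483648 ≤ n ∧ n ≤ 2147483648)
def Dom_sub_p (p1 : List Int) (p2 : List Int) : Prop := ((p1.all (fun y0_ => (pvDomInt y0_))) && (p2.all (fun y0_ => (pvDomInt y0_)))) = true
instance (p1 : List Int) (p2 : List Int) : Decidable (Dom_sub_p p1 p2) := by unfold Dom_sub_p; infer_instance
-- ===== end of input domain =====

-- B replaces A's padded index loop (range over max length with per-index bounds
-- checks) by a zip over the overlapping region plus one tail pass (copied or
-- negated slice): idiomatic, same cost.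

-- ===== PORT A =====
-- A: n = max(len p1, len p2); res[i] = (p1[i] if i < len p1 else 0) - (p2[i] if i < len p2 else 0)
def sub_p (p1 : List Int) (p2 : List Int) : List Int :=
  let n := max p1.length p2.length
  (List.range n).map (fun i =>
    (if i < p1.length then p1.getD i 0 else 0) - (if i < p2.length then p2.getD i 0 else 0))

-- ===== PORT B =====
-- B: head = zip-subtraction over the overlap; tail = leftover of the longer list
def sub_p_alt (p1 : List Int) (p2 : List Int) : List Int :=
  let m := min p1.length p2.length
  let head := (p1.zip p2).map (fun xy => xy.1 - xy.2)
  if p1.length > p2.length then head ++ p1.drop m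
  else if p2.length > p1.length then head ++ (p2.drop m).map (fun x => -x)
  else head

-- ===== PRECONDITION & SPEC =====
def Spec_sub_p (p1 : List Int) (p2 : List Int) (out : List Int) : Prop := out = sub_p_alt p1 p2
instance (p1 : List Int) (p2 : List Int) (out : List Int) : Decidable (Spec_sub_p p1 p2 out) := by unfold Spec_sub_p; infer_instance

-- ===== CLAIM (what is proved, stated in full; the proofs are below) =====
def Claim_equal_sub_p : Prop := ∀ (p1 : List Int) (p2 : List Int), Dom_sub_p p1 p2 → Spec_sub_p p1 p2 (sub_p p1 p2)

-- ===== LEMMAS AND PROOFS =====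

theorem sub_p_nil_left (p2 : List Int) : sub_p [] p2 = p2.map (fun x => -x) := by
  induction p2 with
  | nil => rfl
  | cons b t ih =>
    simp only [sub_p, List.length_nil, List.length_cons] at *
    rw [Nat.max_eq_right (Nat.zero_le _), List.range_succ_eq_map, List.map_cons, List.map_map]
    rw [Nat.max_eq_right (Nat.zero_le _)] at ih
    congr 1
    · simp
    · rw [← ih]
      apply List.map_congr_left
      intro i _
      simp

theorem sub_p_nil_right (p1 : List Int) : sub_p p1 [] = p1 := by
  induction p1 with
  | nil => rfl
  | cons a t ih =>
    simp only [sub_p, List.length_nil, List.length_cons] at *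
    rw [Nat.max_eq_left (Nat.zero_le _), List.range_succ_eq_map, List.map_cons, List.map_map]
    rw [Nat.max_eq_left (Nat.zero_le _)] at ih
    congr 1
    · simp
    · conv_rhs => rw [← ih]
      apply List.map_congr_left
      intro i _
      simp

theorem sub_p_cons (a b : Int) (p1 p2 : List Int) :
    sub_p (a :: p1) (b :: p2) = (a - b) :: sub_p p1 p2 := by
  simp only [sub_p, List.length_cons]
  rw [Nat.succ_max_succ, List.range_succ_eq_map, List.map_cons, List.map_map]
  congr 1
  apply List.map_congr_left
  intro i _
  simp

theorem sub_p_alt_cons (a b : Int) (p1 p2 : List Int) :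
    sub_p_alt (a :: p1) (b :: p2) = (a - b) :: sub_p_alt p1 p2 := by
  simp only [sub_p_alt, List.length_cons, List.zip_cons_cons, List.map_cons,
    Nat.succ_min_succ, List.drop_succ_cons, gt_iff_lt, Nat.succ_lt_succ_iff]
  split_ifs <;> rfl

theorem sub_p_eq_alt (p1 p2 : List Int) : sub_p p1 p2 = sub_p_alt p1 p2 := by
  induction p1 generalizing p2 with
  | nil =>
    rw [sub_p_nil_left]
    cases p2 with
    | nil => rfl
    | cons b t => simp [sub_p_alt]
  | cons a t ih =>
    cases p2 with
    | nil => rw [sub_p_nil_right]; simp [sub_p_alt]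
    | cons b t2 => rw [sub_p_cons, sub_p_alt_cons, ih]

-- ===== VERDICT (by name: the statement is the Claim_ definition above) =====
theorem sub_p_spec : Claim_equal_sub_p := by
  intro p1 p2 _
  unfold Spec_sub_p
  exact sub_p_eq_alt p1 p2
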